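-- pv_equiv track=rewrite | github.com/DE-shin/Algorithm | 프로그래머스/2/12913. 땅따먹기/땅따먹기.py | solution
-- ===== SOURCE A (Python) =====
-- def solution(land):
--     answer = 0
--     n = len(land)
--
--     for i in range(1, n):
--         for j in range(4):
--             land[i][j] += max([land[i-1][x] for x in range(4) if x != j])
--
--
--     answer = max(land[-1])
--
--     return answer
-- ===== SOURCE B (Python) =====
-- def _top2(prev):
--     # one scan of prev[0..3]: largest value m1 with its first index arg, second value m2
--     m1 = m2 = None
--     arg = -1
--     for j in range(4):
--         v = prev[j]
--         if m1 is None or v > m1: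
--             m2 = m1
--             m1 = v
--             arg = j
--         elif m2 is None or v > m2:
--             m2 = v
--     return m1, arg, m2
--
--
-- def solution(land):
--     # B: per row, one scan of the previous row gives its top-two summary, then a flat
--     # add pass: every column gets m1 except the top column arg, which gets m2.
--     # Mutates land in place exactly like A.
--     for i in range(1, len(land)):
--         m1, arg, m2 = _top2(land[i - 1])
--         row = land[i]
--         for j in range(4):
--             row[j] += m2 if j == arg else m1
--     return max(land[-1])
-- ===== Notes on version B (the rewrite author's own statement) =====
-- stated objective: alternative
-- what changed: Instead of rebuilding and re-maximising a 3-element 'all columns except j' list for each of the 4 columns of every row, B scans the previous row once to get its maximum m1 (with first index arg) and second maximum m2, then adds m1 to every column except arg, which gets m2; same O(n) cost, measured on par.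
import Mathlib
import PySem

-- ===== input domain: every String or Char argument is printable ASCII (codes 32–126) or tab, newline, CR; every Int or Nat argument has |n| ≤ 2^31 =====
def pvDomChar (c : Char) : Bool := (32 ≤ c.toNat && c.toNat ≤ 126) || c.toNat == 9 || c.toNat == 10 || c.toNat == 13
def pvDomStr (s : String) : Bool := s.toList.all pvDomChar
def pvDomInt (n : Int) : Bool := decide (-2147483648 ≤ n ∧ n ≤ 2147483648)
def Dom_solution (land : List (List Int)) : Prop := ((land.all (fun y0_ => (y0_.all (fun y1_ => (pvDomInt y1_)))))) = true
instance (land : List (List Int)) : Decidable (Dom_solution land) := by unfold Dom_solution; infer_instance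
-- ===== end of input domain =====

-- B replaces A's four 'max of the other three columns' rescans per row by one scan of the
-- previous row computing its top value (with first index) and second value, then a flat add
-- pass; same return value, and both Pythons mutate `land` in place identically (the theorems
-- here are about the return value).

-- shared indexing helper: land[i][j] += v ; exact for the nonneg in-range indices both
-- programs use under Pre_ (pySetD/pyGetD are the total forms of Python's indexing)
def addAt (L : List (List Int)) (i j v : Int) : List (List Int) :=
  PySem.List.pySetD L i
    (PySem.List.pySetD (PySem.List.pyGetD L i []) j
      (PySem.List.pyGetD (PySem.List.pyGetD L i []) j 0 + v))

-- ===== PORT A =====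
def solution (land : List (List Int)) : Int :=
  let n : Int := PySem.List.len land
  let land2 := (PySem.List.pyRange 1 n 1).foldl (fun L i =>
    (PySem.List.pyRange 0 4 1).foldl (fun L j =>
      -- land[i][j] += max([land[i-1][x] for x in range(4) if x != j])
      let m := PySem.List.max?
        (((PySem.List.pyRange 0 4 1).filter (fun x => x != j)).map
          (fun x => PySem.List.pyGetD (PySem.List.pyGetD L (i - 1) []) x 0)) (fun y => y)
      addAt L i j (m.getD 0)) L) land
  (PySem.List.max? (PySem.List.pyGetD land2 (-1) []) (fun y => y)).getD 0

-- ===== PORT B =====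
-- helper _top2: one scan of prev[0..3]; m1 = max value, arg = its first index, m2 = second max
def top2Scan (prev : List Int) : Option Int × Int × Option Int :=
  (PySem.List.pyRange 0 4 1).foldl
    (fun (s : Option Int × Int × Option Int) j =>
      let v := PySem.List.pyGetD prev j 0
      match s with
      | (none, _, _) => (some v, j, none)
      | (some a, arg, m2) =>
        if v > a then (some v, j, some a)
        else match m2 with
          | none => (some a, arg, some v)
          | some b => if v > b then (some a, arg, some v) else (some a, arg, some b))
    (none, -1, none)

def solution_alt (land : List (List Int)) : Int :=
  let land2 := (PySem.List.pyRange 1 (PySem.List.len land) 1).foldl (fun L i =>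
    match top2Scan (PySem.List.pyGetD L (i - 1) []) with
    | (m1, arg, m2) =>
      (PySem.List.pyRange 0 4 1).foldl
        (fun L j => addAt L i j (if j = arg then m2.getD 0 else m1.getD 0)) L) land
  (PySem.List.max? (PySem.List.pyGetD land2 (-1) []) (fun y => y)).getD 0

-- ===== PRECONDITION & SPEC =====
-- Pre_ is exactly where Python A returns: a nonempty land, rows of length ≥ 4 when there
-- are at least two rows (every row is indexed at columns 0..3), and a nonempty single row
-- (max() of an empty row raises).
def Pre_solution (land : List (List Int)) : Prop :=
  land ≠ [] ∧ (2 ≤ land.length → ∀ r ∈ land, 4 ≤ r.length) ∧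
    (land.length = 1 → land.headI ≠ [])
instance (land : List (List Int)) : Decidable (Pre_solution land) := by
  unfold Pre_solution; infer_instance

def pvWitness_solution : List (List Int) := [[1, 2, 3, 4], [5, 6, 7, 8]]

def Spec_solution (land : List (List Int)) (out : Int) : Prop := out = solution_alt land
instance (land : List (List Int)) (out : Int) : Decidable (Spec_solution land out) := by
  unfold Spec_solution; infer_instance

-- ===== CLAIM (what is proved, stated in full; the proofs are below) =====
def Claim_equal_solution : Prop :=
  ∀ (land : List (List Int)), Dom_solution land → Pre_solution land →
    Spec_solution land (solution land)

-- ===== LEMMAS AND PROOFS =====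

-- updating row i leaves row i-1 unchanged (1 ≤ i)
lemma pyGetD_addAt_pred (L : List (List Int)) (i j v : Int) (hi : 1 ≤ i) :
    PySem.List.pyGetD (addAt L i j v) (i - 1) [] = PySem.List.pyGetD L (i - 1) [] := by
  have hne : ¬ (i.toNat = i.toNat - 1) := by omega
  unfold addAt
  rw [PySem.List.pySetD_of_nonneg _ _ (by omega : (0:Int) ≤ i),
      PySem.List.pyGetD_of_nonneg _ _ (by omega : (0:Int) ≤ i - 1),
      PySem.List.pyGetD_of_nonneg _ _ (by omega : (0:Int) ≤ i - 1)]
  simp [List.getD, hne]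

-- two add-chains over columns 0..3 agree when the four added values agree
lemma chain4 (L : List (List Int)) (i a0 a1 a2 a3 b0 b1 b2 b3 : Int)
    (h0 : a0 = b0) (h1 : a1 = b1) (h2 : a2 = b2) (h3 : a3 = b3) :
    addAt (addAt (addAt (addAt L i 0 a0) i 1 a1) i 2 a2) i 3 a3
      = addAt (addAt (addAt (addAt L i 0 b0) i 1 b1) i 2 b2) i 3 b3 := by
  rw [h0, h1, h2, h3]

-- the arithmetic core: the top-two summary of prev[0..3] selects, for every column j,
-- exactly the maximum of the other three columns
set_option maxRecDepth 16384 in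
lemma scan_spec (prev : List Int) (m1 m2 : Option Int) (arg : Int)
    (h : top2Scan prev = (m1, arg, m2)) :
    (max (max (PySem.List.pyGetD prev 1 0) (PySem.List.pyGetD prev 2 0))
        (PySem.List.pyGetD prev 3 0) = if (0:Int) = arg then m2.getD 0 else m1.getD 0)
  ∧ (max (max (PySem.List.pyGetD prev 0 0) (PySem.List.pyGetD prev 2 0))
        (PySem.List.pyGetD prev 3 0) = if (1:Int) = arg then m2.getD 0 else m1.getD 0)
  ∧ (max (max (PySem.List.pyGetD prev 0 0) (PySem.List.pyGetD prev 1 0))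
        (PySem.List.pyGetD prev 3 0) = if (2:Int) = arg then m2.getD 0 else m1.getD 0)
  ∧ (max (max (PySem.List.pyGetD prev 0 0) (PySem.List.pyGetD prev 1 0))
        (PySem.List.pyGetD prev 2 0) = if (3:Int) = arg then m2.getD 0 else m1.getD 0) := by
  have hr : PySem.List.pyRange 0 4 1 = [0, 1, 2, 3] := by decide
  unfold top2Scan at h
  simp only [hr, List.foldl] at h
  generalize PySem.List.pyGetD prev 0 0 = p0 at h ⊢
  generalize PySem.List.pyGetD prev 1 0 = p1 at h ⊢
  generalize PySem.List.pyGetD prev 2 0 = p2 at h ⊢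
  generalize PySem.List.pyGetD prev 3 0 = p3 at h ⊢
  split_ifs at h <;> (try dsimp only at h) <;>
    (try split_ifs at h) <;> (try dsimp only at h) <;>
    (try split_ifs at h) <;>
    (simp only [Prod.mk.injEq] at h; obtain ⟨h1, h2, h3⟩ := h;
     subst h1; subst h2; subst h3) <;>
    refine ⟨?_, ?_, ?_, ?_⟩ <;> simp only [reduceIte, Option.getD_some] <;> omega

-- the two row-update steps agree for every state and every i ≥ 1
set_option maxRecDepth 16384 in
lemma step_eq (L : List (List Int)) (i : Int) (hi : 1 ≤ i) :
    (PySem.List.pyRange 0 4 1).foldl (fun L j =>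
      let m := PySem.List.max?
        (((PySem.List.pyRange 0 4 1).filter (fun x => x != j)).map
          (fun x => PySem.List.pyGetD (PySem.List.pyGetD L (i - 1) []) x 0)) (fun y => y)
      addAt L i j (m.getD 0)) L
    =
    (match top2Scan (PySem.List.pyGetD L (i - 1) []) with
     | (m1, arg, m2) =>
      (PySem.List.pyRange 0 4 1).foldl
        (fun L j => addAt L i j (if j = arg then m2.getD 0 else m1.getD 0)) L) := by
  have hprev : ∀ (L' : List (List Int)) (j v : Int),
      PySem.List.pyGetD (addAt L' i j v) (i - 1) [] = PySem.List.pyGetD L' (i - 1) [] :=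
    fun L' j v => pyGetD_addAt_pred L' i j v hi
  have hr : PySem.List.pyRange 0 4 1 = [0, 1, 2, 3] := by decide
  have hf0 : List.filter (fun x => x != (0:Int)) [0, 1, 2, 3] = [1, 2, 3] := by decide
  have hf1 : List.filter (fun x => x != (1:Int)) [0, 1, 2, 3] = [0, 2, 3] := by decide
  have hf2 : List.filter (fun x => x != (2:Int)) [0, 1, 2, 3] = [0, 1, 3] := by decide
  have hf3 : List.filter (fun x => x != (3:Int)) [0, 1, 2, 3] = [0, 1, 2] := by decide
  simp only [hr, List.foldl, hprev, hf0, hf1, hf2, hf3, List.map,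
    PySem.List.max?_id_cons, Option.getD_some]
  generalize hS : top2Scan (PySem.List.pyGetD L (i - 1) []) = S
  obtain ⟨m1, arg, m2⟩ := S
  have hsel := scan_spec _ _ _ _ hS
  exact chain4 _ _ _ _ _ _ _ _ _ _ hsel.1 hsel.2.1 hsel.2.2.1 hsel.2.2.2

-- ===== VERDICT (by name: the statement is the Claim_ definition above) =====
theorem solution_spec : Claim_equal_solution := by
  intro land _ _
  show solution land = solution_alt land
  have h : (PySem.List.pyRange 1 (PySem.List.len land) 1).foldl (fun L i =>
      (PySem.List.pyRange 0 4 1).foldl (fun L j =>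
        let m := PySem.List.max?
          (((PySem.List.pyRange 0 4 1).filter (fun x => x != j)).map
            (fun x => PySem.List.pyGetD (PySem.List.pyGetD L (i - 1) []) x 0)) (fun y => y)
        addAt L i j (m.getD 0)) L) land
    = (PySem.List.pyRange 1 (PySem.List.len land) 1).foldl (fun L i =>
      match top2Scan (PySem.List.pyGetD L (i - 1) []) with
      | (m1, arg, m2) =>
        (PySem.List.pyRange 0 4 1).foldl
          (fun L j => addAt L i j (if j = arg then m2.getD 0 else m1.getD 0)) L) land :=
    PySem.List.foldl_congr_mem' _ _ _ land (fun i hi L =>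
      step_eq L i (by have := (PySem.List.mem_pyRange_one).1 hi; omega))
  show (PySem.List.max? (PySem.List.pyGetD ((PySem.List.pyRange 1 (PySem.List.len land) 1).foldl
      (fun L i => (PySem.List.pyRange 0 4 1).foldl (fun L j =>
        let m := PySem.List.max?
          (((PySem.List.pyRange 0 4 1).filter (fun x => x != j)).map
            (fun x => PySem.List.pyGetD (PySem.List.pyGetD L (i - 1) []) x 0)) (fun y => y)
        addAt L i j (m.getD 0)) L) land) (-1) []) (fun y => y)).getD 0
    = (PySem.List.max? (PySem.List.pyGetD ((PySem.List.pyRange 1 (PySem.List.len land) 1).foldl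
      (fun L i => match top2Scan (PySem.List.pyGetD L (i - 1) []) with
        | (m1, arg, m2) =>
          (PySem.List.pyRange 0 4 1).foldl
            (fun L j => addAt L i j (if j = arg then m2.getD 0 else m1.getD 0)) L) land) (-1) [])
      (fun y => y)).getD 0
  rw [h]
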